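-- pv_equiv track=rewrite | github.com/Lucas-t-rex/Chatbot | app/models/agenda.py | agrupar_horarios_em_faixas
-- ===== SOURCE A (Python) =====
-- def agrupar_horarios_em_faixas(lista_horarios, step=15):
--     if not lista_horarios:
--         return "Nenhum horário disponível."
--
--     minutos = []
--     for h in lista_horarios:
--         try:
--             h_split = h.split(':')
--             m = int(h_split[0]) * 60 + int(h_split[1])
--             minutos.append(m)
--         except (ValueError, IndexError):
--             continue
--
--     if not minutos:
--         return "Horários em formato inválido."
--
--     minutos.sort()
--     faixas = []
--     if not minutos: return ""
--
--     inicio_faixa = minutos[0]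
--     anterior = minutos[0]
--     count_seq = 1
--
--     def _formatar_bloco(inicio, fim, step, count):
--         if count >= 3:
--             fim_real = fim + step
--             str_ini = f"{inicio // 60:02d}:{inicio % 60:02d}"
--             str_fim = f"{fim_real // 60:02d}:{fim_real % 60:02d}"
--             return f"das {str_ini} às {str_fim}"
--         else:
--             result = []
--             temp = inicio
--             while temp <= fim:
--                 result.append(f"{temp // 60:02d}:{temp % 60:02d}")
--                 temp += step
--             return ", ".join(result)
--
--     for atual in minutos[1:]:
--         if atual == anterior + step:
--             anterior = atual
--             count_seq += 1
--         else:
--             faixas.append(_formatar_bloco(inicio_faixa, anterior, step, count_seq))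
--             inicio_faixa = atual
--             anterior = atual
--             count_seq = 1
--
--     faixas.append(_formatar_bloco(inicio_faixa, anterior, step, count_seq))
--
--     if len(faixas) == 1:
--         return faixas[0]
--
--     return ", ".join(faixas[:-1]) + " e " + faixas[-1]
-- ===== SOURCE B (Python) =====
-- def agrupar_horarios_em_faixas(lista_horarios, step=15):
--     if not lista_horarios:
--         return "Nenhum horário disponível."
--
--     def _para_minutos(h):
--         partes = h.split(':')
--         try:
--             return int(partes[0]) * 60 + int(partes[1])
--         except (ValueError, IndexError):
--             return None
--
--     minutos = sorted(m for m in map(_para_minutos, lista_horarios) if m is not None)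
--     if not minutos:
--         return "Horários em formato inválido."
--
--     def _fmt(m):
--         return f"{m // 60:02d}:{m % 60:02d}"
--
--     # staged passes: first compute every run boundary (an index i starts a run
--     # iff it is 0 or minutos[i] does not extend minutos[i-1] by step), then cut
--     # the sorted list between consecutive boundaries and format each slice
--     cortes = [i for i in range(len(minutos))
--               if i == 0 or minutos[i] != minutos[i - 1] + step]
--     cortes.append(len(minutos))
--
--     faixas = [
--         f"das {_fmt(g[0])} às {_fmt(g[-1] + step)}" if b - a >= 3
--         else ", ".join(_fmt(m) for m in g)
--         for a, b in zip(cortes, cortes[1:])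
--         for g in [minutos[a:b]]
--     ]
--
--     if len(faixas) == 1:
--         return faixas[0]
--     return ", ".join(faixas[:-1]) + " e " + faixas[-1]
-- ===== Notes on version B (the rewrite author's own statement) =====
-- stated objective: alternative
-- what changed: B replaces A's one-pass rolling state machine (inicio/anterior/count_seq updated per element, emitting a block on each break, with a while loop that re-steps through short runs) by staged declarative passes: it first computes the list of run-boundary indices (i such that i==0 or minutos[i] != minutos[i-1]+step), then zips consecutive boundaries and formats each slice minutos[a:b] directly from its endpoints.
-- outside the precondition, e.g. on agrupar_horarios_em_faixas(['10:00', '10:00', '10:00'], 0): A returns 'das 10:00 às 10:00', B returns 'das 10:00 às 10:00'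
import Mathlib
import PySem

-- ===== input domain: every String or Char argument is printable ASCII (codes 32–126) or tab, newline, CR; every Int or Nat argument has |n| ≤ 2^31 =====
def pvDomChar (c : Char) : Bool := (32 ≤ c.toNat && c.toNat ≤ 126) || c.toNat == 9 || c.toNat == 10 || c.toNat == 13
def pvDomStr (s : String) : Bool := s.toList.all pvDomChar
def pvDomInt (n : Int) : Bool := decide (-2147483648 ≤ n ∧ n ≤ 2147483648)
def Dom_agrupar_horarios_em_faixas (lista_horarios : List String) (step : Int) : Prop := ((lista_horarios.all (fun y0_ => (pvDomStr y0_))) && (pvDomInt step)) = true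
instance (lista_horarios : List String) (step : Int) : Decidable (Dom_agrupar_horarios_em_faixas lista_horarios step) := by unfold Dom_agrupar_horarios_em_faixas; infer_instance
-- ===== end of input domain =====

-- B replaces A's one-pass state machine (inicio/anterior/count + a while loop re-generating the
-- times) by staged passes: it first computes every run-boundary index declaratively, then cuts the
-- sorted list between consecutive boundaries and formats each slice (alternative; same cost).

-- ===== PORT A =====

-- f"{n:02d}" (zero-pad to width 2; a negative sign already fills the width for -9..-1)
def pvFmt2 (n : Int) : String :=
  if 0 ≤ n ∧ n < 10 then "0" ++ PySem.Int.toStr n else PySem.Int.toStr n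

-- f"{m // 60:02d}:{m % 60:02d}"
def pvFmtTime (m : Int) : String :=
  pvFmt2 (PySem.Int.floordiv m 60) ++ ":" ++ pvFmt2 (PySem.Int.mod m 60)

-- the 'while temp <= fim: … temp += step' loop of _formatar_bloco.
-- '0 < step' in the guard is a totality guard only: for step ≤ 0 (and temp ≤ fim) the
-- Python loop never terminates, and Pre_ excludes every input that reaches it.
def pvLoopA (fim step temp : Int) : List String :=
  if h : temp ≤ fim ∧ 0 < step then pvFmtTime temp :: pvLoopA fim step (temp + step) else []
termination_by (fim + step - temp).toNat
decreasing_by obtain ⟨h1, h2⟩ := h; omega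

-- _formatar_bloco(inicio, fim, step, count)
def pvBlocoA (inicio fim step count : Int) : String :=
  if 3 ≤ count then "das " ++ pvFmtTime inicio ++ " às " ++ pvFmtTime (fim + step)
  else PySem.Str.join ", " (pvLoopA fim step inicio)

-- the final assembly 'if len(faixas)==1 … else ", ".join(faixas[:-1]) + " e " + faixas[-1]'
-- (these trailing lines are identical in A and in B, so both ports share this helper)
def pvMonta (faixas : List String) : String :=
  if faixas.length = 1 then PySem.List.pyGetD faixas 0 ""
  else PySem.Str.join ", " (PySem.List.slice faixas none (some (-1))) ++ " e " ++
       PySem.List.pyGetD faixas (-1) ""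

-- the body of A's parsing loop (try/except ValueError/IndexError: continue)
def pvCorpoParse (acc : List Int) (h : String) : List Int :=
  match PySem.List.pyGet? ((PySem.Str.split? h ":").getD []) 0 with
  | none => acc
  | some s0 =>
    match PySem.Int.ofStr? s0 with
    | none => acc
    | some a =>
      match PySem.List.pyGet? ((PySem.Str.split? h ":").getD []) 1 with
      | none => acc
      | some s1 =>
        match PySem.Int.ofStr? s1 with
        | none => acc
        | some b => acc ++ [a * 60 + b]

-- the body of A's grouping loop; state = (inicio_faixa, anterior, count_seq, faixas)
def pvPassoA (step : Int) (s : Int × Int × Int × List String) (atual : Int) :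
    Int × Int × Int × List String :=
  if atual = s.2.1 + step then (s.1, atual, s.2.2.1 + 1, s.2.2.2)
  else (atual, atual, 1, s.2.2.2 ++ [pvBlocoA s.1 s.2.1 step s.2.2.1])

def agrupar_horarios_em_faixas (lista_horarios : List String) (step : Int) : String :=
  if lista_horarios = [] then "Nenhum horário disponível." else
  let minutos := lista_horarios.foldl pvCorpoParse []
  if minutos = [] then "Horários em formato inválido." else
  let minutos := PySem.List.sorted minutos (fun m => m) false
  if minutos = [] then "" else
  let inicio_faixa := PySem.List.pyGetD minutos 0 0
  let st := (PySem.List.slice minutos (some 1) none).foldl (pvPassoA step)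
      (inicio_faixa, inicio_faixa, 1, ([] : List String))
  pvMonta (st.2.2.2 ++ [pvBlocoA st.1 st.2.1 step st.2.2.1])

-- ===== PORT B =====

-- _para_minutos(h): int(partes[0]) * 60 + int(partes[1]), None on ValueError/IndexError
def pvParaMinutos (h : String) : Option Int :=
  match PySem.List.pyGet? ((PySem.Str.split? h ":").getD []) 0 with
  | none => none
  | some s0 =>
    match PySem.Int.ofStr? s0 with
    | none => none
    | some a =>
      match PySem.List.pyGet? ((PySem.Str.split? h ":").getD []) 1 with
      | none => none
      | some s1 =>
        match PySem.Int.ofStr? s1 with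
        | none => none
        | some b => some (a * 60 + b)

-- the boundary comprehension's filter: 'i == 0 or minutos[i] != minutos[i-1] + step'
def pvQ (step : Int) (minutos : List Int) (i : Int) : Bool :=
  i == 0 || !(PySem.List.pyGetD minutos i 0 == PySem.List.pyGetD minutos (i - 1) 0 + step)

-- one entry of B's faixas comprehension, from a pair (a, b) of consecutive cut indices
def pvFmtFaixa (step : Int) (minutos : List Int) (p : Int × Int) : String :=
  let g := PySem.List.slice minutos (some p.1) (some p.2)
  if 3 ≤ p.2 - p.1 then
    "das " ++ pvFmtTime (PySem.List.pyGetD g 0 0) ++ " às " ++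
    pvFmtTime (PySem.List.pyGetD g (-1) 0 + step)
  else PySem.Str.join ", " (g.map pvFmtTime)

def agrupar_horarios_em_faixas_alt (lista_horarios : List String) (step : Int) : String :=
  if lista_horarios = [] then "Nenhum horário disponível." else
  let minutos := PySem.List.sorted ((lista_horarios.map pvParaMinutos).filterMap id)
      (fun m => m) false
  if minutos = [] then "Horários em formato inválido." else
  let n := PySem.List.len minutos
  let cortes := (PySem.List.pyRange 0 n 1).filter (pvQ step minutos) ++ [n]
  let faixas := (cortes.zip (PySem.List.slice cortes (some 1) none)).map
      (pvFmtFaixa step minutos)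
  pvMonta faixas

-- ===== PRECONDITION & SPEC =====

-- Pre_ excludes step ≤ 0 whenever some time string parses: there A's 'while temp <= fim;
-- temp += step' never terminates on every run shorter than 3 (it returns only in the rare
-- all-runs-of-duplicates-with-step-0 case, which is excluded with it — see the cite).
def Pre_agrupar_horarios_em_faixas (lista_horarios : List String) (step : Int) : Prop :=
  0 < step ∨ lista_horarios = [] ∨ ∀ h ∈ lista_horarios, pvParaMinutos h = none
instance (lista_horarios : List String) (step : Int) : Decidable (Pre_agrupar_horarios_em_faixas lista_horarios step) := by unfold Pre_agrupar_horarios_em_faixas; infer_instance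

def pvWitness_agrupar_horarios_em_faixas : List String × Int := (["10:00", "10:15", "11:00"], 15)

def Spec_agrupar_horarios_em_faixas (lista_horarios : List String) (step : Int) (out : String) : Prop := out = agrupar_horarios_em_faixas_alt lista_horarios step
instance (lista_horarios : List String) (step : Int) (out : String) : Decidable (Spec_agrupar_horarios_em_faixas lista_horarios step out) := by unfold Spec_agrupar_horarios_em_faixas; infer_instance

-- ===== CLAIM (what is proved, stated in full; the proofs are below) =====
def Claim_equal_agrupar_horarios_em_faixas : Prop := ∀ (lista_horarios : List String) (step : Int), Dom_agrupar_horarios_em_faixas lista_horarios step → Pre_agrupar_horarios_em_faixas lista_horarios step → Spec_agrupar_horarios_em_faixas lista_horarios step (agrupar_horarios_em_faixas lista_horarios step)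

-- ===== LEMMAS AND PROOFS =====

-- formatting of one group given as its list of minutes (proof-level common form of
-- A's _formatar_bloco and B's two comprehension arms)
def pvFmtGrupo (step : Int) (g : List Int) : String :=
  if 3 ≤ g.length then
    "das " ++ pvFmtTime (PySem.List.pyGetD g 0 0) ++ " às " ++
    pvFmtTime (PySem.List.pyGetD g (-1) 0 + step)
  else PySem.Str.join ", " (g.map pvFmtTime)

-- the arithmetic run i, i+s, …, i+s*(c-1)
def pvRun (i s : Int) : Nat → List Int
  | 0 => []
  | c + 1 => i :: pvRun (i + s) s c

-- length of the maximal prefix of l that continues m in steps of step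
def pvRunLen (step : Int) : Int → List Int → Nat
  | _, [] => 0
  | m, x :: xs => if x = m + step then pvRunLen step x xs + 1 else 0

-- the list of maximal runs of the nonempty list m :: tl (the grouping both programs compute)
def pvGroups (step : Int) (m : Int) (tl : List Int) : List (List Int) :=
  (m :: tl.take (pvRunLen step m tl)) ::
    (match h : tl.drop (pvRunLen step m tl) with
     | [] => []
     | x :: xs => pvGroups step x xs)
termination_by tl.length
decreasing_by
  have h2 := congrArg List.length h
  simp only [List.length_drop, List.length_cons] at h2
  omega

theorem pvRun_length (s : Int) : ∀ (c : Nat) (i : Int), (pvRun i s c).length = c := by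
  intro c
  induction c with
  | zero => intro i; simp [pvRun]
  | succ c ih => intro i; simp [pvRun, ih]

theorem pvRun_append (s : Int) :
    ∀ (c : Nat) (i : Int), pvRun i s c ++ [i + s * c] = pvRun i s (c + 1) := by
  intro c
  induction c with
  | zero => intro i; simp [pvRun]
  | succ c ih =>
      intro i
      show (i :: pvRun (i + s) s c) ++ _ = i :: pvRun (i + s) s (c + 1)
      rw [List.cons_append]
      rw [show i + s * (((c + 1 : Nat)) : Int) = (i + s) + s * (c : Int) by push_cast; ring]
      rw [ih (i + s)]

theorem pvRun_getElem? (s : Int) :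
    ∀ (c : Nat) (i : Int) (k : Nat), k < c → (pvRun i s c)[k]? = some (i + s * k) := by
  intro c
  induction c with
  | zero => intro i k hk; omega
  | succ c ih =>
      intro i k hk
      cases k with
      | zero => simp [pvRun]
      | succ k =>
          show (i :: pvRun (i + s) s c)[k + 1]? = _
          rw [List.getElem?_cons_succ, ih (i + s) k (by omega)]
          have : i + s + s * (k : Int) = i + s * ((k + 1 : Nat) : Int) := by push_cast; ring
          rw [this]

theorem pvRunLen_le (step : Int) :
    ∀ (l : List Int) (m : Int), pvRunLen step m l ≤ l.length := by
  intro l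
  induction l with
  | nil => intro m; simp [pvRunLen]
  | cons x xs ih =>
      intro m
      simp only [pvRunLen, List.length_cons]
      split
      · exact Nat.succ_le_succ (ih x)
      · omega

theorem pvRunLen_take (step : Int) :
    ∀ (l : List Int) (m : Int),
      l.take (pvRunLen step m l) = pvRun (m + step) step (pvRunLen step m l) := by
  intro l
  induction l with
  | nil => intro m; simp [pvRunLen, pvRun]
  | cons x xs ih =>
      intro m
      simp only [pvRunLen]
      by_cases hx : x = m + step
      · rw [if_pos hx, List.take_succ_cons, ih x]
        show _ = (m + step) :: pvRun (m + step + step) step _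
        rw [hx]
      · rw [if_neg hx]
        simp [pvRun]

theorem pvRunLen_stop (step : Int) :
    ∀ (l : List Int) (m : Int) (x : Int),
      (l.drop (pvRunLen step m l)).head? = some x →
      x ≠ m + step * (pvRunLen step m l) + step := by
  intro l
  induction l with
  | nil => intro m x hx; simp at hx
  | cons y ys ih =>
      intro m x hx
      simp only [pvRunLen] at *
      by_cases hy : y = m + step
      · rw [if_pos hy] at hx ⊢
        rw [List.drop_succ_cons] at hx
        have := ih y x hx
        intro hc
        apply this
        rw [hc, hy]
        push_cast
        ring
      · rw [if_neg hy] at hx ⊢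
        simp only [List.drop_zero, List.head?_cons, Option.some.injEq] at hx
        subst hx
        push_cast
        simpa using hy

theorem pvGroups_nil (step m : Int) (tl : List Int)
    (h : tl.drop (pvRunLen step m tl) = []) :
    pvGroups step m tl = [m :: tl.take (pvRunLen step m tl)] := by
  rw [pvGroups]
  split
  · rfl
  · simp_all

theorem pvGroups_cons (step m : Int) (tl : List Int) (x : Int) (xs : List Int)
    (h : tl.drop (pvRunLen step m tl) = x :: xs) :
    pvGroups step m tl = (m :: tl.take (pvRunLen step m tl)) :: pvGroups step x xs := by
  rw [pvGroups]
  split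
  · simp_all
  · rename_i x' xs' h'
    rw [h] at h'
    cases h'
    rfl

theorem pvRunLen_run (step : Int) :
    ∀ (c : Nat) (inicio : Int) (tail : List Int),
      (∀ x, tail.head? = some x → x ≠ inicio + step * c + step) →
      pvRunLen step inicio (pvRun (inicio + step) step c ++ tail) = c := by
  intro c
  induction c with
  | zero =>
      intro inicio tail htail
      simp only [pvRun, List.nil_append]
      cases tail with
      | nil => rfl
      | cons x xs =>
          simp only [pvRunLen]
          rw [if_neg]
          have := htail x rfl
          push_cast at this
          simpa using this
  | succ c ih =>
      intro inicio tail htail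
      show pvRunLen step inicio ((inicio + step) :: (pvRun (inicio + step + step) step c ++ tail)) = c + 1
      have hred : pvRunLen step inicio
          ((inicio + step) :: (pvRun (inicio + step + step) step c ++ tail)) =
          pvRunLen step (inicio + step) (pvRun (inicio + step + step) step c ++ tail) + 1 := by
        simp [pvRunLen]
      rw [hred, ih (inicio + step) tail ?_]
      intro x hx hc
      apply htail x hx
      rw [hc]
      push_cast
      ring

theorem pvGroups_run_nil (step : Int) (c : Nat) (inicio : Int) :
    pvGroups step inicio (pvRun (inicio + step) step c) = [pvRun inicio step (c + 1)] := by
  have hr := pvRunLen_run step c inicio [] (by intro x hx; simp at hx)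
  rw [List.append_nil] at hr
  have hlen : (pvRun (inicio + step) step c).length = c := pvRun_length step c _
  rw [pvGroups_nil step inicio _ (by rw [hr]; exact List.drop_eq_nil_of_le (by omega))]
  rw [hr, List.take_of_length_le (by omega)]
  rfl

theorem pvGroups_run_cons (step : Int) (c : Nat) (inicio : Int) (x : Int) (xs : List Int)
    (hx : x ≠ inicio + step * c + step) :
    pvGroups step inicio (pvRun (inicio + step) step c ++ x :: xs) =
      (pvRun inicio step (c + 1)) :: pvGroups step x xs := by
  have hr := pvRunLen_run step c inicio (x :: xs)
    (by intro y hy; simp only [List.head?_cons, Option.some.injEq] at hy; subst hy; exact hx)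
  have hlen : (pvRun (inicio + step) step c).length = c := pvRun_length step c _
  have hdrop : (pvRun (inicio + step) step c ++ x :: xs).drop c = x :: xs :=
    List.drop_left' hlen
  rw [pvGroups_cons step inicio _ x xs (by rw [hr]; exact hdrop)]
  rw [hr, List.take_left' hlen]
  rfl

-- ---- parsing (shared by both ports) ----

theorem pvCorpoParse_eq (acc : List Int) (h : String) :
    pvCorpoParse acc h = acc ++ (pvParaMinutos h).toList := by
  unfold pvCorpoParse pvParaMinutos
  repeat' split
  all_goals simp_all

theorem pvParse_foldl (lista : List String) :
    ∀ (acc : List Int),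
      lista.foldl pvCorpoParse acc = acc ++ (lista.map pvParaMinutos).filterMap id := by
  induction lista with
  | nil => intro acc; simp
  | cons h t ih =>
      intro acc
      rw [List.foldl_cons, ih, pvCorpoParse_eq]
      cases hm : pvParaMinutos h with
      | none => simp [hm]
      | some m => simp [hm]

theorem pvAllNone_filterMap (lista : List String)
    (h : ∀ x ∈ lista, pvParaMinutos x = none) :
    (lista.map pvParaMinutos).filterMap id = [] := by
  induction lista with
  | nil => simp
  | cons a t ih =>
      simp only [List.map_cons, List.filterMap_cons, h a (by simp), id]
      exact ih (fun x hx => h x (by simp [hx]))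

-- ---- A's _formatar_bloco vs the group formatter ----

theorem pvLoopA_run (step : Int) (hs : 0 < step) :
    ∀ (c : Nat) (i : Int),
      pvLoopA (i + step * c) step i = (pvRun i step (c + 1)).map pvFmtTime := by
  intro c
  induction c with
  | zero =>
      intro i
      rw [pvLoopA]
      rw [dif_pos (by constructor <;> omega)]
      rw [pvLoopA]
      rw [dif_neg (by push_cast; intro hc; omega)]
      simp [pvRun]
  | succ c ih =>
      intro i
      have hpos : (0:Int) < step * ((c:Int) + 1) :=
        mul_pos hs (by positivity)
      rw [pvLoopA]
      rw [dif_pos (by constructor <;> push_cast <;> omega)]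
      have harg : i + step * ((c:Nat) + 1 : Nat) = (i + step) + step * (c : Int) := by
        push_cast; ring
      rw [harg, ih (i + step)]
      show _ = (i :: pvRun (i + step) step (c + 1)).map pvFmtTime
      simp

theorem pvFmtGrupo_bloco (step : Int) (hs : 0 < step) (c : Nat) (i : Int) :
    pvFmtGrupo step (pvRun i step (c + 1)) = pvBlocoA i (i + step * c) step ((c : Int) + 1) := by
  unfold pvFmtGrupo pvBlocoA
  by_cases h3 : 3 ≤ c + 1
  · rw [if_pos (by rw [pvRun_length]; omega), if_pos (by omega)]
    have h0 : PySem.List.pyGetD (pvRun i step (c + 1)) 0 0 = i := by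
      show PySem.List.pyGetD (i :: pvRun (i + step) step c) 0 0 = i
      exact PySem.List.pyGetD_zero_cons _ _ _
    have hlast : PySem.List.pyGetD (pvRun i step (c + 1)) (-1) 0 = i + step * c := by
      rw [← pvRun_append step c i]
      simp [PySem.List.pyGetD_neg_one_append_singleton]
    rw [h0, hlast]
  · rw [if_neg (by rw [pvRun_length]; omega), if_neg (by omega)]
    rw [pvLoopA_run step hs c i]

-- ---- A's grouping loop computes the run decomposition ----

theorem pvInvA (step : Int) (hs : 0 < step) :
    ∀ (rest : List Int) (c : Nat) (inicio : Int) (fx : List String),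
      (fun sA => sA.2.2.2 ++ [pvBlocoA sA.1 sA.2.1 step sA.2.2.1])
        (rest.foldl (pvPassoA step) (inicio, inicio + step * c, (c : Int) + 1, fx))
      = fx ++ (pvGroups step inicio (pvRun (inicio + step) step c ++ rest)).map
          (pvFmtGrupo step) := by
  intro rest
  induction rest with
  | nil =>
      intro c inicio fx
      simp only [List.foldl_nil]
      rw [List.append_nil, pvGroups_run_nil step c inicio]
      simp only [List.map_cons, List.map_nil]
      rw [pvFmtGrupo_bloco step hs c inicio]
  | cons atual rest ih =>
      intro c inicio fx
      simp only [List.foldl_cons]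
      have hA : pvPassoA step (inicio, inicio + step * c, (c : Int) + 1, fx) atual =
          if atual = inicio + step * c + step
          then (inicio, atual, (c : Int) + 1 + 1, fx)
          else (atual, atual, 1, fx ++ [pvBlocoA inicio (inicio + step * c) step ((c : Int) + 1)]) := by
        unfold pvPassoA; split_ifs <;> rfl
      rw [hA]
      by_cases hc : atual = inicio + step * c + step
      · rw [if_pos hc]
        have h1 : pvRun (inicio + step) step c ++ atual :: rest =
            pvRun (inicio + step) step (c + 1) ++ rest := by
          rw [show atual :: rest = [atual] ++ rest from rfl, ← List.append_assoc]
          congr 1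
          rw [hc, show inicio + step * c + step = (inicio + step) + step * (c : Int) by ring]
          exact pvRun_append step c (inicio + step)
        have h2 := ih (c + 1) inicio fx
        rw [h1]
        have hst : ((inicio, atual, (c : Int) + 1 + 1, fx) : Int × Int × Int × List String) =
            (inicio, inicio + step * ((c + 1 : Nat) : Int), ((c + 1 : Nat) : Int) + 1, fx) := by
          rw [hc]
          push_cast
          refine Prod.ext rfl (Prod.ext (by ring) rfl)
        rw [hst]
        exact h2
      · rw [if_neg hc]
        have h2 := ih 0 atual (fx ++ [pvBlocoA inicio (inicio + step * c) step ((c : Int) + 1)])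
        simp only [Nat.cast_zero, mul_zero, add_zero, zero_add, pvRun, List.nil_append] at h2
        rw [h2]
        rw [pvGroups_run_cons step c inicio atual rest hc]
        simp only [List.map_cons, List.append_assoc, List.cons_append, List.nil_append]
        rw [pvFmtGrupo_bloco step hs c inicio]

-- ---- B's boundary pipeline computes the run decomposition ----

theorem pvFilterSkip (Q : Int → Bool) :
    ∀ (d : Nat) (s n : Int),
      (∀ j, s ≤ j → j < s + d → Q j = false) →
      (PySem.List.pyRange s n 1).filter Q = (PySem.List.pyRange (s + (d : Int)) n 1).filter Q := by
  intro d
  induction d with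
  | zero => intro s n _; norm_num
  | succ d ih =>
      intro s n hQ
      by_cases hsn : s < n
      · rw [PySem.List.pyRange_one_cons hsn]
        rw [List.filter_cons_of_neg (by simp [hQ s le_rfl (by push_cast; omega)])]
        rw [ih (s + 1) n (fun j h1 h2 => hQ j (by omega) (by push_cast at h2 ⊢; omega))]
        congr 2
        push_cast
        ring
      · rw [PySem.List.pyRange_one_eq_nil (by omega),
            PySem.List.pyRange_one_eq_nil (by push_cast; omega)]

theorem pvFmtFaixa_eq (step : Int) (ms : List Int) (a b : Nat) (hab : a ≤ b)
    (hb : b ≤ ms.length) :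
    pvFmtFaixa step ms ((a : Int), (b : Int)) =
      pvFmtGrupo step (PySem.List.slice ms (some (a : Int)) (some (b : Int))) := by
  have hlen : (PySem.List.slice ms (some (a : Int)) (some (b : Int))).length = b - a := by
    rw [PySem.List.slice_natCast]
    simp only [List.length_take, List.length_drop]
    omega
  unfold pvFmtFaixa pvFmtGrupo
  by_cases h3 : 3 ≤ (b : Int) - (a : Int)
  · rw [if_pos h3, if_pos (by rw [hlen]; omega)]
  · rw [if_neg h3, if_neg (by rw [hlen]; omega)]

theorem pvInvB (step : Int) (ms : List Int) :
    ∀ (k a : Nat) (ha : a < ms.length), ms.length - a ≤ k →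
      ((((a : Nat) : Int) ::
          ((PySem.List.pyRange ((a : Int) + 1) ((ms.length : Int)) 1).filter (pvQ step ms) ++
            [((ms.length : Int))])).zip
        ((PySem.List.pyRange ((a : Int) + 1) ((ms.length : Int)) 1).filter (pvQ step ms) ++
          [((ms.length : Int))])).map (pvFmtFaixa step ms)
      = (pvGroups step (ms[a]'ha) (ms.drop (a + 1))).map (pvFmtGrupo step) := by
  intro k
  induction k with
  | zero => intro a ha hk; omega
  | succ k ih =>
      intro a ha hk
      set m : Int := ms[a]'ha with hm
      set l : List Int := ms.drop (a + 1) with hl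
      set r : Nat := pvRunLen step m l with hr
      have hlen_l : l.length = ms.length - (a + 1) := by rw [hl, List.length_drop]
      have hrle : r ≤ l.length := pvRunLen_le step l m
      have htake : l.take r = pvRun (m + step) step r := pvRunLen_take step l m
      have hstop : ∀ x, (l.drop r).head? = some x → x ≠ m + step * r + step :=
        fun x hx => pvRunLen_stop step l m x hx
      have hb_le : a + 1 + r ≤ ms.length := by omega
      -- element formula inside the run
      have hElem : ∀ i, i < r → ms[a + 1 + i]? = some (m + step + step * i) := by
        intro i hi
        have h1 : l[i]? = (l.take r)[i]? := by
          rw [List.getElem?_take_of_lt hi]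
        have h2 : (l.take r)[i]? = some (m + step + step * i) := by
          rw [htake]; exact pvRun_getElem? step r (m + step) i hi
        have h3 : ms[a + 1 + i]? = l[i]? := by
          rw [hl, List.getElem?_drop]
        rw [h3, h1, h2]
      -- value at position a + j for j ≤ r (uniform formula m + step * j)
      have hVal : ∀ j, j ≤ r → ms[a + j]? = some (m + step * j) := by
        intro j hj
        cases j with
        | zero => simp [hm, List.getElem?_eq_getElem ha]
        | succ j =>
            have := hElem j (by omega)
            rw [show a + (j + 1) = a + 1 + j by omega, this]
            congr 1
            push_cast
            ring
      -- pvQ is false strictly inside the run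
      have hQf : ∀ j : Int, (a : Int) + 1 ≤ j → j < (a : Int) + 1 + (r : Int) →
          pvQ step ms j = false := by
        intro j h1 h2
        obtain ⟨jn, rfl⟩ : ∃ jn : Nat, j = (jn : Int) := ⟨j.toNat, by omega⟩
        have hjn1 : a + 1 ≤ jn := by exact_mod_cast h1
        have hjn2 : jn < a + 1 + r := by exact_mod_cast h2
        have hcur : ms[jn]? = some (m + step * ((jn : Int) - (a : Int))) := by
          have h0 := hVal (jn - a) (by omega)
          rw [show a + (jn - a) = jn by omega] at h0
          rw [show ((jn - a : Nat) : Int) = (jn : Int) - (a : Int) by omega] at h0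
          exact h0
        have hprev : ms[jn - 1]? = some (m + step * ((jn : Int) - 1 - (a : Int))) := by
          have h0 := hVal (jn - 1 - a) (by omega)
          rw [show a + (jn - 1 - a) = jn - 1 by omega] at h0
          rw [show ((jn - 1 - a : Nat) : Int) = (jn : Int) - 1 - (a : Int) by omega] at h0
          exact h0
        have hg1 : PySem.List.pyGetD ms (jn : Int) 0 = m + step * ((jn : Int) - (a : Int)) := by
          rw [PySem.List.pyGetD_natCast, List.getD_eq_getElem?_getD, hcur, Option.getD_some]
        have hg2 : PySem.List.pyGetD ms ((jn : Int) - 1) 0 = m + step * ((jn : Int) - 1 - (a : Int)) := by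
          rw [show ((jn : Int) - 1) = (((jn - 1 : Nat)) : Int) by omega]
          rw [PySem.List.pyGetD_natCast, List.getD_eq_getElem?_getD, hprev, Option.getD_some]
          rw [show ((jn - 1 : Nat) : Int) = (jn : Int) - 1 by omega]
        unfold pvQ
        rw [hg1, hg2]
        simp only [Bool.or_eq_false_iff, beq_eq_false_iff_ne, ne_eq, Bool.not_eq_false',
          beq_iff_eq]
        constructor
        · omega
        · ring
      -- collapse the filtered range through the run
      have hskip : (PySem.List.pyRange ((a : Int) + 1) ((ms.length : Int)) 1).filter (pvQ step ms)
          = (PySem.List.pyRange ((a : Int) + 1 + (r : Int)) ((ms.length : Int)) 1).filter (pvQ step ms) :=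
        pvFilterSkip (pvQ step ms) r ((a : Int) + 1) (ms.length : Int) hQf
      by_cases hcase : a + 1 + r = ms.length
      · -- the run reaches the end of the list
        have hrange : PySem.List.pyRange ((a : Int) + 1 + (r : Int)) ((ms.length : Int)) 1 = [] :=
          PySem.List.pyRange_one_eq_nil (by omega)
        rw [hskip, hrange]
        simp only [List.filter_nil, List.nil_append]
        have hdrop_nil : l.drop r = [] := List.drop_eq_nil_of_le (by omega)
        rw [pvGroups_nil step m l hdrop_nil]
        have hslice : PySem.List.slice ms (some (a : Int)) (some ((ms.length : Int))) =
            m :: l.take r := by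
          rw [show ((ms.length : Int)) = (((ms.length : Nat)) : Int) from rfl]
          rw [PySem.List.slice_natCast]
          rw [List.drop_eq_getElem_cons ha, ← hm, ← hl]
          rw [show ms.length - a = r + 1 by omega]
          rw [List.take_succ_cons]
        simp only [List.zip_cons_cons, List.zip_nil_right, List.map_cons, List.map_nil]
        have := pvFmtFaixa_eq step ms a ms.length (by omega) le_rfl
        rw [this, hslice]
      · -- the run stops before the end: the next index is a cut
        have hblt : a + 1 + r < ms.length := by omega
        have hQb : pvQ step ms ((a + 1 + r : Nat) : Int) = true := by
          have hnext : ms[a + 1 + r]? = some (ms[a + 1 + r]'hblt) := List.getElem?_eq_getElem hblt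
          have hheads : (l.drop r).head? = some (ms[a + 1 + r]'hblt) := by
            rw [hl, List.drop_drop, List.head?_drop]
            exact hnext
          have hne := hstop _ hheads
          have hprevb : ms[a + 1 + r - 1]? = some (m + step * r) := by
            have := hVal r le_rfl
            rwa [show a + r = a + 1 + r - 1 by omega] at this
          unfold pvQ
          have hg1 : PySem.List.pyGetD ms ((a + 1 + r : Nat) : Int) 0 = ms[a + 1 + r]'hblt := by
            rw [PySem.List.pyGetD_natCast, List.getD_eq_getElem?_getD, hnext]
            rfl
          have hg2 : PySem.List.pyGetD ms (((a + 1 + r : Nat) : Int) - 1) 0 = m + step * r := by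
            rw [show (((a + 1 + r : Nat) : Int) - 1) = (((a + 1 + r - 1 : Nat)) : Int) by omega]
            rw [PySem.List.pyGetD_natCast, List.getD_eq_getElem?_getD, hprevb]
            rfl
          rw [hg1, hg2]
          simp only [Bool.or_eq_true, beq_iff_eq, Bool.not_eq_true', beq_eq_false_iff_ne, ne_eq]
          right
          exact hne
        have hrange : PySem.List.pyRange ((a : Int) + 1 + (r : Int)) ((ms.length : Int)) 1 =
            ((a + 1 + r : Nat) : Int) ::
              PySem.List.pyRange (((a + 1 + r : Nat) : Int) + 1) ((ms.length : Int)) 1 := by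
          rw [show (a : Int) + 1 + (r : Int) = ((a + 1 + r : Nat) : Int) by push_cast; ring]
          exact PySem.List.pyRange_one_cons (by exact_mod_cast hblt)
        rw [hskip, hrange, List.filter_cons_of_pos hQb]
        have hih := ih (a + 1 + r) hblt (by omega)
        simp only [List.cons_append, List.zip_cons_cons, List.map_cons]
        rw [show (((a + 1 + r : Nat) : Int) + 1) = (((a + 1 + r : Nat) : Int) + 1) from rfl]
        rw [hih]
        -- right-hand side: peel the first group
        have hdropb : l.drop r = ms[a + 1 + r]'hblt :: ms.drop (a + 1 + r + 1) := by
          rw [hl, List.drop_drop]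
          exact List.drop_eq_getElem_cons hblt
        rw [pvGroups_cons step m l _ _ hdropb]
        simp only [List.map_cons]
        congr 1
        have hslice : PySem.List.slice ms (some (a : Int)) (some ((a + 1 + r : Nat) : Int)) =
            m :: l.take r := by
          rw [PySem.List.slice_natCast]
          rw [List.drop_eq_getElem_cons ha, ← hm, ← hl]
          rw [show a + 1 + r - a = r + 1 by omega]
          rw [List.take_succ_cons]
        rw [pvFmtFaixa_eq step ms a (a + 1 + r) (by omega) (by omega), hslice]

-- ===== VERDICT (by name: the statement is the Claim_ definition above) =====
theorem agrupar_horarios_em_faixas_spec : Claim_equal_agrupar_horarios_em_faixas := by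
  intro lista step _ hpre
  unfold Spec_agrupar_horarios_em_faixas
  by_cases hl : lista = []
  · simp [agrupar_horarios_em_faixas, agrupar_horarios_em_faixas_alt, hl]
  have hparse := pvParse_foldl lista []
  rw [List.nil_append] at hparse
  by_cases hm : (lista.map pvParaMinutos).filterMap id = []
  · simp only [agrupar_horarios_em_faixas, agrupar_horarios_em_faixas_alt, if_neg hl, hparse, hm]
    rfl
  have hstep : 0 < step := by
    rcases hpre with h | h | h
    · exact h
    · exact absurd h hl
    · exact absurd (pvAllNone_filterMap lista h) hm
  have hS : PySem.List.sorted ((lista.map pvParaMinutos).filterMap id) (fun m => m) false ≠ [] := by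
    intro hnil
    rw [PySem.List.sorted_eq_nil_iff] at hnil
    exact hm hnil
  obtain ⟨m0, rest, hSr⟩ := List.exists_cons_of_ne_nil hS
  have hA := pvInvA step hstep rest 0 m0 []
  simp only [Nat.cast_zero, mul_zero, add_zero, zero_add, pvRun, List.nil_append] at hA
  have hlen0 : 0 < (m0 :: rest).length := by simp
  have hQ0 : pvQ step (m0 :: rest) 0 = true := by unfold pvQ; simp
  have hB := pvInvB step (m0 :: rest) (m0 :: rest).length 0 hlen0 (by omega)
  simp only [Nat.cast_zero, zero_add] at hB
  have hcortes : (PySem.List.pyRange 0 (((m0 :: rest).length : Int)) 1).filter (pvQ step (m0 :: rest)) ++ [(((m0 :: rest).length : Int))] =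
      (0 : Int) :: ((PySem.List.pyRange 1 (((m0 :: rest).length : Int)) 1).filter (pvQ step (m0 :: rest)) ++ [(((m0 :: rest).length : Int))]) := by
    rw [PySem.List.pyRange_one_cons (by exact_mod_cast hlen0), List.filter_cons_of_pos hQ0]
    rfl
  simp only [agrupar_horarios_em_faixas, agrupar_horarios_em_faixas_alt, if_neg hl, hparse,
    if_neg hm, hSr, if_neg (List.cons_ne_nil m0 rest),
    PySem.List.pyGetD_zero_cons, PySem.List.slice_from_one, List.tail_cons]
  rw [hA]
  simp only [PySem.List.len_eq, hcortes, List.tail_cons]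
  rw [hB]
  rfl
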